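-- pv_equiv track=rewrite | github.com/wilsonzlin/aero | scripts/ci/check-windows-virtio-contract.py | _strip_inf_comment
-- ===== SOURCE A (Python) =====
-- def _strip_inf_comment(line: str) -> str:
--     # INF comments start at ';' unless inside quotes.
--     out_chars: list[str] = []
--     in_quote = False
--     for ch in line:
--         if ch == '"':
--             in_quote = not in_quote
--         if ch == ";" and not in_quote:
--             break
--         out_chars.append(ch)
--     return "".join(out_chars).rstrip("\r\n")
-- ===== SOURCE B (Python) =====
-- def _strip_inf_comment(line: str) -> str:
--     # Segment view: split on '"'; even-indexed segments are outside quotes,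
--     # odd-indexed ones inside.  Cut at the first ';' in an even segment.
--     kept = []
--     for i, part in enumerate(line.split('"')):
--         if i % 2 == 0 and ";" in part:
--             kept.append(part.partition(";")[0])
--             break
--         kept.append(part)
--     return '"'.join(kept).rstrip("\r\n")
-- ===== Notes on version B (the rewrite author's own statement) =====
-- stated objective: faster
-- what changed: Replaces the per-character quote-toggle loop by splitting the line into quote-delimited segments (even index = outside quotes), cutting at the first ';' in an even segment and reassembling with a join.
import Mathlib
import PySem

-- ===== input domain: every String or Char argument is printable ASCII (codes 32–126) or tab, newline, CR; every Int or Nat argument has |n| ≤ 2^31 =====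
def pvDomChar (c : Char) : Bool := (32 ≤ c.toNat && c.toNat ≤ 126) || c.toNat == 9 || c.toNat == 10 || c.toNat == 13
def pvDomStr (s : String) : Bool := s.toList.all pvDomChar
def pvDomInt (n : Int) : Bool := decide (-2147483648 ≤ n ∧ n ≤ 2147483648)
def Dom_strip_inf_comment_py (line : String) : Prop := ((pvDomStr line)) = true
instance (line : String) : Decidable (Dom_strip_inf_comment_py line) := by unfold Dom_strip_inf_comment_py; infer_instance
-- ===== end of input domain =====

-- B replaces A's per-character quote-toggle loop by splitting on the quote character into
-- segments (even index = outside quotes) and cutting at the first unquoted semicolon;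
-- measurably faster in Python (bulk split/join instead of a per-character loop).


-- hand port of str.rstrip("\r\n"): drop trailing '\r'/'\n' characters (exact)
def pvRstripCRLF (cs : List Char) : List Char :=
  (cs.reverse.dropWhile (fun c => c == '\r' || c == '\n')).reverse

-- ===== PORT A =====
-- the for-loop of A: accumulate chars, toggle in_quote on '"', break at unquoted ';'
def pvALoop : List Char → Bool → List Char
  | [], _ => []
  | c :: cs, q =>
    let q' := if c == '"' then !q else q
    if c == ';' && !q' then [] else c :: pvALoop cs q'

def strip_inf_comment_py (line : String) : String :=
  String.ofList (pvRstripCRLF (pvALoop line.toList false))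

-- ===== PORT B =====
-- the for-loop of B over enumerate(line.split('"')); part.partition(";")[0] is the
-- prefix before the first ';' (hand port of partition's first component, exact for a 1-char sep)
def pvBKeep : List (List Char) → Nat → List (List Char)
  | [], _ => []
  | p :: ps, i =>
    if i % 2 == 0 && PySem.Chars.isIn [';'] p then
      [p.takeWhile (fun c => c != ';')]
    else p :: pvBKeep ps (i + 1)

def strip_inf_comment_py_alt (line : String) : String :=
  String.ofList (pvRstripCRLF
    (PySem.Chars.join ['"'] (pvBKeep (PySem.Chars.splitOn line.toList ['"']) 0)))

-- ===== PRECONDITION & SPEC =====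
def Spec_strip_inf_comment_py (line : String) (out : String) : Prop := out = strip_inf_comment_py_alt line
instance (line : String) (out : String) : Decidable (Spec_strip_inf_comment_py line out) := by unfold Spec_strip_inf_comment_py; infer_instance

-- ===== CLAIM (what is proved, stated in full; the proofs are below) =====
def Claim_equal_strip_inf_comment_py : Prop := ∀ (line : String), Dom_strip_inf_comment_py line → Spec_strip_inf_comment_py line (strip_inf_comment_py line)

-- ===== LEMMAS AND PROOFS =====

-- reference splitter: head segment and remaining segments of splitting at '"'
def pvSplit : List Char → List Char × List (List Char)
  | [] => ([], [])
  | c :: r =>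
    if c == '"' then ([], (pvSplit r).1 :: (pvSplit r).2)
    else (c :: (pvSplit r).1, (pvSplit r).2)

lemma pvGo_spec (l : List Char) : ∀ (fuel : Nat), l.length ≤ fuel → ∀ (cur : List Char) (acc : List (List Char)),
    PySem.Chars.splitOn.go ['"'] fuel l cur acc
      = acc.reverse ++ (cur.reverse ++ (pvSplit l).1) :: (pvSplit l).2 := by
  induction l with
  | nil =>
    intro fuel _ cur acc
    cases fuel <;> simp [PySem.Chars.splitOn.go, pvSplit]
  | cons c r ih =>
    intro fuel hf cur acc
    cases fuel with
    | zero => simp at hf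
    | succ f =>
      by_cases hc : c = '"'
      · subst hc
        simp only [PySem.Chars.splitOn.go, List.isPrefixOf, BEq.rfl, Bool.true_and,
          if_true]
        rw [show List.drop ['"'].length ('"' :: r) = r from rfl,
          ih f (by simpa using hf) [] (cur.reverse :: acc)]
        simp [pvSplit]
      · have hpre : List.isPrefixOf ['"'] (c :: r) = false := by
          simp only [List.isPrefixOf, Bool.and_true]
          exact beq_eq_false_iff_ne.mpr fun h => hc h.symm
        simp only [PySem.Chars.splitOn.go, hpre]
        rw [ih f (by simpa using Nat.le_of_succ_le_succ hf) (c :: cur) acc]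
        simp [pvSplit, hc]

lemma pvSplitOn_quote (l : List Char) :
    PySem.Chars.splitOn l ['"'] = (pvSplit l).1 :: (pvSplit l).2 := by
  unfold PySem.Chars.splitOn
  rw [pvGo_spec l (l.length + 1) (Nat.le_succ _) [] []]
  simp

lemma pvIsIn_single (a : Char) (l : List Char) :
    PySem.Chars.isIn [a] l = l.contains a := by
  by_cases h : a ∈ l
  · have : [a] <:+: l := by
      obtain ⟨s, t, rfl⟩ := List.append_of_mem h
      exact ⟨s, t, by simp⟩
    simp [(PySem.Chars.isIn_iff_infix _ _).mpr this, h]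
  · have : ¬ [a] <:+: l := fun hin => h (by simpa using hin.sublist.mem (a := a) (by simp))
    simp [(PySem.Chars.isIn_eq_false_iff _ _).mpr this, h]

lemma pvBKeep_ne_nil (p : List Char) (ps : List (List Char)) (i : Nat) :
    pvBKeep (p :: ps) i ≠ [] := by
  simp only [pvBKeep]; split <;> simp

lemma pvJoin_cons_head (sep c : Char) (h : List Char) (X : List (List Char)) :
    PySem.Chars.join [sep] ((c :: h) :: X) = c :: PySem.Chars.join [sep] (h :: X) := by
  cases X <;> simp [PySem.Chars.join, List.intercalate]

lemma pvBKeep_cons_head (c : Char) (h : List Char) (t : List (List Char)) (i : Nat)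
    (hc : c ≠ '"') :
    PySem.Chars.join ['"'] (pvBKeep ((c :: h) :: t) i)
      = if c = ';' ∧ i % 2 = 0 then []
        else c :: PySem.Chars.join ['"'] (pvBKeep (h :: t) i) := by
  by_cases hi : i % 2 = 0
  · by_cases hcs : c = ';'
    · subst hcs
      have : PySem.Chars.isIn [';'] (';' :: h) = true := by
        rw [pvIsIn_single]; simp
      simp [pvBKeep, hi, this, PySem.Chars.join, List.intercalate]
    · by_cases hm : ';' ∈ h
      · have h1 : PySem.Chars.isIn [';'] (c :: h) = true := by
          rw [pvIsIn_single]; simp [hm]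
        have h2 : PySem.Chars.isIn [';'] h = true := by
          rw [pvIsIn_single]; simp [hm]
        simp [pvBKeep, hi, h1, h2, hcs, PySem.Chars.join,
          List.intercalate]
      · have h1 : PySem.Chars.isIn [';'] (c :: h) = false := by
          rw [pvIsIn_single, List.contains_cons]
          simp [hm, Ne.symm hcs]
        have h2 : PySem.Chars.isIn [';'] h = false := by
          rw [pvIsIn_single]; simp [hm]
        simp only [pvBKeep, h1, h2, Bool.and_false, Bool.false_eq_true, if_false]
        rw [pvJoin_cons_head, if_neg (fun hx => hcs hx.1)]
  · simp only [pvBKeep]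
    have : (i % 2 == 0) = false := by simpa using hi
    simp only [this, Bool.false_and, if_false, Bool.false_eq_true]
    rw [pvJoin_cons_head, if_neg (fun hx => hi hx.2)]

lemma pvMain (l : List Char) : ∀ (q : Bool) (i : Nat), (i % 2 = 0 ↔ q = false) →
    pvALoop l q = PySem.Chars.join ['"'] (pvBKeep ((pvSplit l).1 :: (pvSplit l).2) i) := by
  induction l with
  | nil =>
    intro q i _
    have : PySem.Chars.isIn [';'] ([] : List Char) = false := by rw [pvIsIn_single]; simp
    simp [pvALoop, pvSplit, pvBKeep, this, PySem.Chars.join, List.intercalate]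
  | cons c r ih =>
    intro q i hpar
    by_cases hc : c = '"'
    · subst hc
      have hnem := pvBKeep_ne_nil (pvSplit r).1 (pvSplit r).2 (i + 1)
      obtain ⟨x, xs, hx⟩ := List.exists_cons_of_ne_nil hnem
      have hpar' : (i + 1) % 2 = 0 ↔ (!q) = false := by
        cases q <;> simp_all <;> omega
      have hq : pvALoop ('"' :: r) q = '"' :: pvALoop r (!q) := by
        simp [pvALoop]
      have hin : PySem.Chars.isIn [';'] ([] : List Char) = false := by
        rw [pvIsIn_single]; simp
      rw [hq, ih (!q) (i + 1) hpar']
      have hs1 : (pvSplit ('"' :: r)).1 = [] := by simp [pvSplit]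
      have hs2 : (pvSplit ('"' :: r)).2 = (pvSplit r).1 :: (pvSplit r).2 := by
        simp [pvSplit]
      have hstep : pvBKeep (([] : List Char) :: (pvSplit r).1 :: (pvSplit r).2) i
          = [] :: pvBKeep ((pvSplit r).1 :: (pvSplit r).2) (i + 1) := by
        simp [pvBKeep, hin]
      rw [hs1, hs2, hstep, hx]
      simp [PySem.Chars.join, List.intercalate]
    · have hsplit : pvSplit (c :: r) = (c :: (pvSplit r).1, (pvSplit r).2) := by
        simp [pvSplit, hc]
      rw [hsplit]
      rw [pvBKeep_cons_head c (pvSplit r).1 (pvSplit r).2 i hc]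
      have hq' : (if c == '"' then !q else q) = q := by simp [hc]
      by_cases hcs : c = ';' ∧ i % 2 = 0
      · obtain ⟨h1, h2⟩ := hcs
        have hqf : q = false := hpar.mp h2
        simp [pvALoop, h1, hqf, h2]
      · have : pvALoop (c :: r) q = c :: pvALoop r q := by
          simp only [pvALoop, hq']
          rcases Decidable.em (c = ';') with h1 | h1
          · have h2 : ¬ i % 2 = 0 := fun h => hcs ⟨h1, h⟩
            have hqt : q = true := by
              cases q
              · exact absurd (hpar.mpr rfl) h2
              · rfl
            simp [h1, hqt]
          · simp [h1]
        rw [this, if_neg hcs, ih q i hpar]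

theorem pv_core (l : List Char) :
    pvALoop l false
      = PySem.Chars.join ['"'] (pvBKeep (PySem.Chars.splitOn l ['"']) 0) := by
  rw [pvSplitOn_quote, pvMain l false 0 (by simp)]

-- ===== VERDICT (by name: the statement is the Claim_ definition above) =====
theorem strip_inf_comment_py_spec : Claim_equal_strip_inf_comment_py := by
  intro line _
  unfold Spec_strip_inf_comment_py strip_inf_comment_py strip_inf_comment_py_alt
  rw [pv_core]
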